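-- pv_equiv track=rewrite | github.com/moti-malka/gl2gh | backend/app/utils/transformers/user_mapper.py | _normalize_name
-- ===== SOURCE A (Python) =====
-- def _normalize_name(name: str) -> str:
--     """
--     Normalize a name for comparison.
--
--     - Lowercase
--     - Strip whitespace
--     - Remove common punctuation
--     """
--     if not name:
--         return ""
--
--     normalized = name.lower().strip()
--     # Remove common punctuation
--     for char in ['.', '-', '_', ',']:
--         normalized = normalized.replace(char, ' ')
--     # Collapse multiple spaces
--     normalized = ' '.join(normalized.split())
--     return normalized
-- ===== SOURCE B (Python) =====
-- def _normalize_name(name: str) -> str: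
--     if not name:
--         return ""
--     words = []
--     buf = []
--     for ch in name.lower():
--         if ch.isspace() or ch in ('.', '-', '_', ','):
--             if buf:
--                 words.append(''.join(buf))
--                 buf = []
--         else:
--             buf.append(ch)
--     if buf:
--         words.append(''.join(buf))
--     return ' '.join(words)
-- ===== Notes on version B (the rewrite author's own statement) =====
-- stated objective: alternative
-- what changed: Replaces A's five full passes over the string (four replace() calls, then split/join) by a single character-at-a-time scan that buffers the current word and flushes it on any separator (whitespace or .-_,).
import Mathlib
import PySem

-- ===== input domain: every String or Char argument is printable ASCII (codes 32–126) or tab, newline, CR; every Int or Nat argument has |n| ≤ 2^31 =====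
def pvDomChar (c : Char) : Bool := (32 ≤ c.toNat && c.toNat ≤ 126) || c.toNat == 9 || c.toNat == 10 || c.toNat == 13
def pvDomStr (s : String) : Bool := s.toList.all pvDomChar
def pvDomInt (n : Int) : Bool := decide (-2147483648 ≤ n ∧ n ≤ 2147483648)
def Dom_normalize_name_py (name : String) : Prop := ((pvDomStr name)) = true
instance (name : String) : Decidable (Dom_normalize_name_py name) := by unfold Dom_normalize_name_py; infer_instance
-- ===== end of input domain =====

-- B replaces A's repeated full passes over the string (four replace() calls, then split/join) by a
-- single character scan that buffers the current word and flushes it on any separator (alternative decomposition).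

-- ===== PORT A =====
def normalize_name_py (name : String) : String :=
  if name = "" then ""
  else
    let normalized := PySem.Str.strip (PySem.Str.lower name)
    let normalized := [".", "-", "_", ","].foldl (fun s ch => PySem.Str.replace s ch " ") normalized
    PySem.Str.join " " (PySem.Str.split₀ normalized)

-- ===== PORT B =====
def normalize_name_py_alt (name : String) : String :=
  if name = "" then ""
  else
    let st := (PySem.Str.lower name).toList.foldl
      (fun (st : List String × List Char) ch =>
        if PySem.Chars.isspace ch || ['.', '-', '_', ','].contains ch then
          if st.2.isEmpty then st else (st.1 ++ [String.ofList st.2], ([] : List Char))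
        else (st.1, st.2 ++ [ch]))
      ([], [])
    let words := if st.2.isEmpty then st.1 else st.1 ++ [String.ofList st.2]
    PySem.Str.join " " words

-- ===== PRECONDITION & SPEC =====
def Spec_normalize_name_py (name : String) (out : String) : Prop := out = normalize_name_py_alt name
instance (name : String) (out : String) : Decidable (Spec_normalize_name_py name out) := by unfold Spec_normalize_name_py; infer_instance

-- ===== CLAIM (what is proved, stated in full; the proofs are below) =====
def Claim_equal_normalize_name_py : Prop := ∀ (name : String), Dom_normalize_name_py name → Spec_normalize_name_py name (normalize_name_py name)

-- ===== LEMMAS AND PROOFS =====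
def pvSep (c : Char) : Bool := PySem.Chars.isspace c || ['.', '-', '_', ','].contains c
def pvF (c : Char) : Char :=
  if c = '.' ∨ c = '-' ∨ c = '_' ∨ c = ',' then ' ' else c
def pvGoSep : List Char → List Char → List (List Char) → List (List Char)
  | [], cur, acc => if cur.isEmpty then acc.reverse else (cur.reverse :: acc).reverse
  | c :: rest, cur, acc =>
    if pvSep c then
      if cur.isEmpty then pvGoSep rest [] acc else pvGoSep rest [] (cur.reverse :: acc)
    else pvGoSep rest (c :: cur) acc
theorem pv_replace_go_single (c : Char) (l : List Char) :
    ∀ (fuel : Nat) (acc : List Char), l.length ≤ fuel →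
      PySem.Chars.replace.go [c] [' '] fuel l acc
        = acc.reverse ++ l.map (fun x => if x = c then ' ' else x) := by
  induction l with
  | nil =>
    intro fuel acc _
    cases fuel <;> simp [PySem.Chars.replace.go]
  | cons x t ih =>
    intro fuel acc hle
    cases fuel with
    | zero => simp at hle
    | succ n =>
      simp only [PySem.Chars.replace.go]
      by_cases hx : x = c
      · subst hx
        simp [List.isPrefixOf, ih n (' ' :: acc) (by simpa using hle)]
      · have : List.isPrefixOf [c] (x :: t) = false := by
          simp [List.isPrefixOf]; exact fun h => hx h.symm
        simp [this, hx, ih n (x :: acc) (by simpa using hle)]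

theorem pv_replace_single (cs : List Char) (c : Char) :
    PySem.Chars.replace cs [c] [' '] = cs.map (fun x => if x = c then ' ' else x) := by
  simp [PySem.Chars.replace, pv_replace_go_single c cs cs.length [] le_rfl]

theorem pv_rep4 (cs : List Char) :
    ((((cs.map (fun x => if x = '.' then ' ' else x)).map (fun x => if x = '-' then ' ' else x)).map
        (fun x => if x = '_' then ' ' else x)).map (fun x => if x = ',' then ' ' else x))
      = cs.map pvF := by
  simp only [List.map_map]
  apply List.map_congr_left
  intro x _
  by_cases h1 : x = '.' <;> by_cases h2 : x = '-' <;> by_cases h3 : x = '_' <;> by_cases h4 : x = ','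
  all_goals simp_all [pvF, Function.comp]

theorem pv_isspace_pvF (c : Char) : PySem.Chars.isspace (pvF c) = pvSep c := by
  by_cases h1 : c = '.' <;> by_cases h2 : c = '-' <;> by_cases h3 : c = '_' <;> by_cases h4 : c = ','
  all_goals simp_all [pvF, pvSep] <;> decide

theorem pv_pvF_of_not_sep {c : Char} (h : pvSep c = false) : pvF c = c := by
  simp [pvSep] at h
  simp [pvF, h]

theorem pv_go_map (cs : List Char) : ∀ (cur : List Char) (acc : List (List Char)),
    PySem.Chars.split₀.go (cs.map pvF) cur acc = pvGoSep cs cur acc := by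
  induction cs with
  | nil => intro cur acc; simp [PySem.Chars.split₀.go, pvGoSep]
  | cons c t ih =>
    intro cur acc
    simp only [List.map_cons, PySem.Chars.split₀.go, pvGoSep, pv_isspace_pvF]
    cases h : pvSep c with
    | true => simp [ih]
    | false => simp [pv_pvF_of_not_sep h, ih]

theorem pv_goSep_allsep (ws : List Char) (h : ∀ c ∈ ws, pvSep c = true) :
    ∀ acc, pvGoSep ws [] acc = acc.reverse := by
  induction ws with
  | nil => intro acc; simp [pvGoSep]
  | cons c t ih =>
    intro acc
    have hc := h c (by simp)
    simp [pvGoSep, hc, ih (fun x hx => h x (by simp [hx]))]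

theorem pv_goSep_append_ws (cs ws : List Char) (h : ∀ c ∈ ws, pvSep c = true) :
    ∀ cur acc, pvGoSep (cs ++ ws) cur acc = pvGoSep cs cur acc := by
  induction cs with
  | nil =>
    intro cur acc
    cases ws with
    | nil => simp
    | cons w t =>
      have hw := h w (by simp)
      have ht : ∀ c ∈ t, pvSep c = true := fun x hx => h x (by simp [hx])
      cases hcur : cur.isEmpty with
      | true =>
        have : cur = [] := by simpa [List.isEmpty_iff] using hcur
        subst this
        simp [pvGoSep, hw, pv_goSep_allsep t ht]
      | false =>
        simp [pvGoSep, hw, hcur, pv_goSep_allsep t ht]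
  | cons c t ih =>
    intro cur acc
    simp only [List.cons_append, pvGoSep]
    cases hc : pvSep c <;> simp [ih]

theorem pv_goSep_dropWhile (cs : List Char) (acc : List (List Char)) :
    pvGoSep (cs.dropWhile PySem.Chars.isspace) [] acc = pvGoSep cs [] acc := by
  induction cs with
  | nil => simp
  | cons c t ih =>
    cases hc : PySem.Chars.isspace c with
    | false => simp [hc]
    | true =>
      have hsep : pvSep c = true := by simp [pvSep, hc]
      simp [hc, pvGoSep, hsep, ih]

theorem pv_goSep_strip (ds : List Char) :
    pvGoSep (PySem.Chars.strip ds) [] [] = pvGoSep ds [] [] := by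
  rw [PySem.Chars.strip]
  set l := PySem.Chars.lstrip ds with hl
  have hsplit : l = PySem.Chars.rstrip l ++ (l.reverse.takeWhile PySem.Chars.isspace).reverse := by
    rw [PySem.Chars.rstrip]
    have h0 : l = (List.takeWhile PySem.Chars.isspace l.reverse ++ List.dropWhile PySem.Chars.isspace l.reverse).reverse := by
      rw [List.takeWhile_append_dropWhile, List.reverse_reverse]
    conv_lhs => rw [h0]
    rw [List.reverse_append]
  have hws : ∀ c ∈ (l.reverse.takeWhile PySem.Chars.isspace).reverse, pvSep c = true := by
    intro c hc
    rw [List.mem_reverse] at hc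
    have := List.mem_takeWhile_imp hc
    simp [pvSep, this]
  calc pvGoSep (PySem.Chars.rstrip l) [] [] 
      = pvGoSep (PySem.Chars.rstrip l ++ (l.reverse.takeWhile PySem.Chars.isspace).reverse) [] [] := 
        (pv_goSep_append_ws _ _ hws [] []).symm
    _ = pvGoSep l [] [] := by rw [← hsplit]
    _ = pvGoSep ds [] [] := by rw [hl, PySem.Chars.lstrip, pv_goSep_dropWhile]

def pvStep (st : List String × List Char) (ch : Char) : List String × List Char :=
  if PySem.Chars.isspace ch || ['.', '-', '_', ','].contains ch then
    if st.2.isEmpty then st else (st.1 ++ [String.ofList st.2], ([] : List Char))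
  else (st.1, st.2 ++ [ch])

def pvFinish (st : List String × List Char) : List String :=
  if st.2.isEmpty then st.1 else st.1 ++ [String.ofList st.2]

theorem pv_fold_go (cs : List Char) : ∀ (buf : List Char) (acc : List (List Char)),
    pvFinish (cs.foldl pvStep (acc.reverse.map String.ofList, buf))
      = (pvGoSep cs buf.reverse acc).map String.ofList := by
  induction cs with
  | nil =>
    intro buf acc
    cases buf with
    | nil => simp [pvFinish, pvGoSep]
    | cons b bs => simp [pvFinish, pvGoSep]
  | cons c t ih =>
    intro buf acc
    simp only [List.foldl_cons]
    cases hc : pvSep c with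
    | true =>
      have hc' : (PySem.Chars.isspace c || ['.', '-', '_', ','].contains c) = true := hc
      cases buf with
      | nil =>
        have h1 : pvStep (acc.reverse.map String.ofList, []) c = (acc.reverse.map String.ofList, []) := by
          unfold pvStep; rw [hc']; simp
        rw [h1, show pvGoSep (c :: t) ([] : List Char).reverse acc = pvGoSep t [] acc by
          simp only [List.reverse_nil, pvGoSep, hc, if_true, List.isEmpty_nil]]
        exact ih [] acc
      | cons b bs =>
        have h1 : pvStep (acc.reverse.map String.ofList, b :: bs) c
            = (acc.reverse.map String.ofList ++ [String.ofList (b :: bs)], []) := by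
          unfold pvStep; rw [hc']; simp
        have h2 := ih [] ((b :: bs) :: acc)
        rw [List.reverse_cons, List.map_append, List.map_cons, List.map_nil] at h2
        rw [h1, show pvGoSep (c :: t) (b :: bs).reverse acc = pvGoSep t [] ((b :: bs) :: acc) by
          simp only [pvGoSep, hc, if_true]
          rw [if_neg (by simp), List.reverse_reverse]]
        exact h2
    | false =>
      have hc' : (PySem.Chars.isspace c || ['.', '-', '_', ','].contains c) = false := hc
      have h1 : pvStep (acc.reverse.map String.ofList, buf) c
          = (acc.reverse.map String.ofList, buf ++ [c]) := by
        unfold pvStep; rw [hc']; simp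
      have h2 := ih (buf ++ [c]) acc
      rw [List.reverse_append, List.reverse_cons, List.reverse_nil, List.nil_append,
        List.singleton_append] at h2
      rw [h1, show pvGoSep (c :: t) buf.reverse acc = pvGoSep t (c :: buf.reverse) acc by
        simp only [pvGoSep, hc, Bool.false_eq_true, if_false]]
      exact h2

-- ===== VERDICT (by name: the statement is the Claim_ definition above) =====
theorem normalize_name_py_spec : Claim_equal_normalize_name_py := by
  intro name _
  unfold Spec_normalize_name_py normalize_name_py normalize_name_py_alt
  by_cases h : name = ""
  · simp [h]
  · simp only [if_neg h]
    trans PySem.Str.join " " ((pvGoSep (PySem.Str.lower name).toList [] []).map String.ofList)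
    · -- A side
      simp only [List.foldl_cons, List.foldl_nil,
        PySem.Str.replace, PySem.Str.strip, PySem.Str.split₀, String.toList_ofList]
      rw [show (".".toList) = ['.'] from rfl, show ("-".toList) = ['-'] from rfl,
        show ("_".toList) = ['_'] from rfl, show (",".toList) = [','] from rfl,
        show (" ".toList) = [' '] from rfl]
      rw [pv_replace_single, pv_replace_single, pv_replace_single, pv_replace_single, pv_rep4]
      simp only [PySem.Chars.split₀]
      rw [pv_go_map, pv_goSep_strip]
    · -- B side
      show PySem.Str.join " " ((pvGoSep (PySem.Str.lower name).toList [] []).map String.ofList)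
          = PySem.Str.join " " (pvFinish ((PySem.Str.lower name).toList.foldl pvStep ([], [])))
      have hb := pv_fold_go (PySem.Str.lower name).toList [] []
      simp only [List.reverse_nil, List.map_nil] at hb
      rw [hb]
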